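-- pv_equiv track=rewrite | github.com/orbweaver-dev/frothiq-control-center | frothiq_control_center/services/ip_enrichment.py | classify_ua
-- ===== SOURCE A (Python) =====
-- def classify_ua(user_agent: str) -> str | None:
--     """
--     Supplement ip-api bot detection with user-agent string analysis.
--     Returns 'bot' if the UA looks automated, None otherwise.
--     """
--     if not user_agent:
--         return None
--     ua = user_agent.lower()
--     bot_signals = [
--         "bot", "crawler", "spider", "scraper", "wget", "curl",
--         "python-requests", "httpx", "go-http-client", "java/",
--         "libwww", "okhttp", "axios", "node-fetch",
--     ]
--     return "bot" if any(s in ua for s in bot_signals) else None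
-- ===== SOURCE B (Python) =====
-- # Position-major single scan: at each index of the lowered UA, test whether any
-- # bot signal starts there, instead of A's one full substring search per signal.
-- _BOT_SIGNALS = (
--     "bot", "crawler", "spider", "scraper", "wget", "curl",
--     "python-requests", "httpx", "go-http-client", "java/",
--     "libwww", "okhttp", "axios", "node-fetch",
-- )
--
-- def classify_ua(user_agent: str) -> str | None:
--     if not user_agent:
--         return None
--     ua = user_agent.lower()
--     for i in range(len(ua)):
--         if any(ua.startswith(s, i) for s in _BOT_SIGNALS):
--             return "bot"
--     return None
-- ===== Notes on version B (the rewrite author's own statement) =====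
-- stated objective: alternative
-- what changed: Replaces A's signal-major loop (one full substring search per bot signal) with a position-major single left-to-right scan that at each index checks whether any signal starts there, returning on the first hit.
import Mathlib
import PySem

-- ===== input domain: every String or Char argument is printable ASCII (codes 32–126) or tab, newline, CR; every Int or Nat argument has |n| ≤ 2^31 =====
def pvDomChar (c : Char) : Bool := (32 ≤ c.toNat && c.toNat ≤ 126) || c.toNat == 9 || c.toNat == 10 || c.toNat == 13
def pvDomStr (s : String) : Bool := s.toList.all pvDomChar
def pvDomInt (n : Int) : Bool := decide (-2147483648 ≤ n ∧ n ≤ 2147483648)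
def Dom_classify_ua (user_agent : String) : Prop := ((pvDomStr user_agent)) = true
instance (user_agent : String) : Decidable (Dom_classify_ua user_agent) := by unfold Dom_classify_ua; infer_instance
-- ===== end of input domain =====

-- B scans the lowered UA position by position, testing at each index whether any bot
-- signal starts there, instead of A's one full substring search per signal (alternative).


-- ===== PORT A =====
def botSignals : List String :=
  ["bot", "crawler", "spider", "scraper", "wget", "curl",
   "python-requests", "httpx", "go-http-client", "java/",
   "libwww", "okhttp", "axios", "node-fetch"]

def classify_ua (user_agent : String) : Option String :=
  if user_agent = "" then none
  else
    let ua := PySem.Str.lower user_agent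
    if botSignals.any (fun s => PySem.Str.isIn s ua) then some "bot" else none

-- ===== PORT B =====
def botSignalsB : List (List Char) := botSignals.map String.toList

-- position-major scan: does any signal start at some index of cs?
def botScan : List Char → Bool
  | [] => false
  | c :: t =>
    if botSignalsB.any (fun s => PySem.Chars.startswith (c :: t) s) then true
    else botScan t

def classify_ua_alt (user_agent : String) : Option String :=
  if user_agent = "" then none
  else
    let ua := PySem.Chars.lower user_agent.toList
    if botScan ua then some "bot" else none

-- ===== PRECONDITION & SPEC =====
def Spec_classify_ua (user_agent : String) (out : Option String) : Prop := out = classify_ua_alt user_agent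
instance (user_agent : String) (out : Option String) : Decidable (Spec_classify_ua user_agent out) := by unfold Spec_classify_ua; infer_instance

-- ===== CLAIM (what is proved, stated in full; the proofs are below) =====
def Claim_equal_classify_ua : Prop := ∀ (user_agent : String), Dom_classify_ua user_agent → Spec_classify_ua user_agent (classify_ua user_agent)

-- ===== LEMMAS AND PROOFS =====

theorem botSignalsB_ne_nil : ∀ s ∈ botSignalsB, s ≠ [] := by decide

theorem botScan_iff (cs : List Char) :
    botScan cs = true ↔ ∃ s ∈ botSignalsB, s <:+: cs := by
  induction cs with
  | nil =>
    simp only [botScan, Bool.false_eq_true, false_iff]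
    rintro ⟨s, hs, hinf⟩
    exact botSignalsB_ne_nil s hs (List.eq_nil_of_infix_nil hinf)
  | cons c t ih =>
    simp only [botScan]
    split_ifs with h
    · simp only [true_iff]
      rcases List.any_eq_true.mp h with ⟨s, hs, hpre⟩
      exact ⟨s, hs, ((PySem.Chars.startswith_iff _ _).mp hpre).isInfix⟩
    · rw [ih]
      constructor
      · rintro ⟨s, hs, hinf⟩; exact ⟨s, hs, hinf.trans ((List.suffix_cons c t).isInfix)⟩
      · rintro ⟨s, hs, hinf⟩
        rcases (List.infix_cons_iff).mp hinf with hpre | hinf'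
        · exact absurd (List.any_eq_true.mpr
            ⟨s, hs, (PySem.Chars.startswith_iff _ _).mpr hpre⟩) h
        · exact ⟨s, hs, hinf'⟩

theorem any_isIn_iff (ua : String) :
    (botSignals.any (fun s => PySem.Str.isIn s ua)) = true ↔
      ∃ s ∈ botSignalsB, s <:+: ua.toList := by
  rw [List.any_eq_true]
  constructor
  · rintro ⟨s, hs, h⟩
    exact ⟨s.toList, List.mem_map_of_mem hs, (PySem.Str.isIn_iff_infix _ _).mp h⟩
  · rintro ⟨sl, hsl, hinf⟩
    rcases List.mem_map.mp hsl with ⟨s, hs, rfl⟩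
    exact ⟨s, hs, (PySem.Str.isIn_iff_infix _ _).mpr hinf⟩

-- ===== VERDICT (by name: the statement is the Claim_ definition above) =====
theorem classify_ua_spec : Claim_equal_classify_ua := by
  intro ua _
  unfold Spec_classify_ua classify_ua classify_ua_alt
  split_ifs with h1
  · rfl
  · show (if (botSignals.any fun s => PySem.Str.isIn s (PySem.Str.lower ua)) = true
        then some "bot" else none)
      = if botScan (PySem.Chars.lower ua.toList) = true then some "bot" else none
    have : (botSignals.any (fun s => PySem.Str.isIn s (PySem.Str.lower ua)))
        = botScan (PySem.Chars.lower ua.toList) := by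
      rw [Bool.eq_iff_iff, any_isIn_iff, botScan_iff, PySem.Str.toList_lower]
    rw [this]
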